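-- pv_equiv track=rewrite | github.com/ynoproject/ynobadges | .scripts/update_credits.py | extract_names_from_value
-- ===== SOURCE A (Python) =====
-- from typing import Iterable, Set, List
--
-- def extract_names_from_value(v) -> Set[str]:
--     """
--     extract artist names from a value.
--     """
--     names: Set[str] = set()
--
--     if v is None:
--         return names
--
--     if not isinstance(v, str):
--         raise ValueError(f"Expected a string, got {type(v)}")
--
--     s = v.strip()
--     if not s:
--         return names
--
--     # co-authorship
--     parts = s.split(" & ")
--     for part in parts:
--         part = part.strip()
--         if not part:
--             continue
--
--         if "," in part:
--             for name in part.split(","):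
--                 name = name.strip()
--                 if name:
--                     names.add(name)
--         else:
--             names.add(part)
--
--     return names
-- ===== SOURCE B (Python) =====
-- def extract_names_from_value(v):
--     """
--     extract artist names from a value.
--     """
--     names = set()
--
--     if v is None:
--         return names
--
--     if not isinstance(v, str):
--         raise ValueError(f"Expected a string, got {type(v)}")
--
--     s = v.strip()
--     if not s:
--         return names
--
--     # flat tokenization: turn " & " separators into commas, split once
--     return {name for token in s.replace(" & ", ",").split(",") if (name := token.strip())}
-- ===== Notes on version B (the rewrite author's own statement) =====
-- stated objective: simpler
-- what changed: Replaces A's nested two-level split (outer ' & ' loop with an inner ','-branch loop) by a single flat tokenization -- rewrite ' & ' separators to ',' and split once -- collected by one set comprehension.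
import Mathlib
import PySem

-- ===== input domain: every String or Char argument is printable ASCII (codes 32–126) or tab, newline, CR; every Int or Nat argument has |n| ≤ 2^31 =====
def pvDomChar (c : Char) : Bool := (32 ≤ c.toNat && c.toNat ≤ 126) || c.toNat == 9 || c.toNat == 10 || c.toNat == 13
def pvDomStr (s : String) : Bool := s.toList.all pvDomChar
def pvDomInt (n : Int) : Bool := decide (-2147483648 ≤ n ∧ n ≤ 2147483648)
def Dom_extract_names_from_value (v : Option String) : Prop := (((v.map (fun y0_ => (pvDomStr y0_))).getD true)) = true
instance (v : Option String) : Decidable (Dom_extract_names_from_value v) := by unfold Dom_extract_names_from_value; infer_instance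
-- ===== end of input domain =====

-- B replaces A's nested two-level split (outer " & " loop with an inner ","-branch loop) by one flat
-- tokenization — rewrite " & " separators to "," and split once — collected by a single comprehension; simpler, same cost.

-- ===== PORT A =====
-- one iteration of A's outer 'for part in parts' loop body
def pvPartStep (names : PySem.Set (List Char)) (part0 : List Char) : PySem.Set (List Char) :=
  let part := PySem.Chars.strip part0
  if part = [] then names
  else if PySem.Chars.isIn [','] part then
    (PySem.Chars.splitOn part [',']).foldl
      (fun ns n0 => let n := PySem.Chars.strip n0; if n = [] then ns else PySem.Set.add ns n) names
  else PySem.Set.add names part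

def extract_names_from_value (v : Option String) : List String :=
  match v with
  | none => []
  | some str =>
    let s := PySem.Chars.strip str.toList
    if s = [] then []
    else ((PySem.Chars.splitOn s [' ', '&', ' ']).foldl pvPartStep PySem.Set.empty).map String.ofList

-- ===== PORT B =====
def extract_names_from_value_alt (v : Option String) : List String :=
  match v with
  | none => []
  | some str =>
    let s := PySem.Chars.strip str.toList
    if s = [] then []
    else (PySem.Set.ofList
      (((PySem.Chars.splitOn (PySem.Chars.replace s [' ', '&', ' '] [',']) [',']).map
          PySem.Chars.strip).filter (fun n => !n.isEmpty))).map String.ofList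

-- ===== PRECONDITION & SPEC =====
def Spec_extract_names_from_value (v : Option String) (out : List String) : Prop := out = extract_names_from_value_alt v
instance (v : Option String) (out : List String) : Decidable (Spec_extract_names_from_value v out) := by unfold Spec_extract_names_from_value; infer_instance

-- ===== CLAIM (what is proved, stated in full; the proofs are below) =====
def Claim_equal_extract_names_from_value : Prop := ∀ (v : Option String), Dom_extract_names_from_value v → Spec_extract_names_from_value v (extract_names_from_value v)

-- ===== LEMMAS AND PROOFS =====

def mapHd (f : List Char → List Char) : List (List Char) → List (List Char)
  | [] => []
  | u :: us => f u :: us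

def sOnAux (c0 : Char) (sep' : List Char) : List Char → List (List Char)
  | [] => [[]]
  | c :: t =>
    if (c0 :: sep').isPrefixOf (c :: t) then [] :: sOnAux c0 sep' (t.drop sep'.length)
    else mapHd (c :: ·) (sOnAux c0 sep' t)
termination_by l => l.length
decreasing_by all_goals (simp; try omega)

lemma mapHd_mapHd (f g : List Char → List Char) (ts : List (List Char)) :
    mapHd f (mapHd g ts) = mapHd (fun u => f (g u)) ts := by
  cases ts <;> rfl

lemma mapHd_congr (f : List Char → List Char) (ts : List (List Char)) (hf : ∀ u, f u = u) :
    mapHd f ts = ts := by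
  cases ts <;> simp [mapHd, hf]

lemma splitOn_go_eq (c0 : Char) (sep' : List Char) :
    ∀ (fuel : Nat) (l cur : List Char) (acc : List (List Char)), l.length < fuel →
      PySem.Chars.splitOn.go (c0 :: sep') fuel l cur acc
        = acc.reverse ++ mapHd (fun u => cur.reverse ++ u) (sOnAux c0 sep' l) := by
  intro fuel
  induction fuel with
  | zero => intro l cur acc h; omega
  | succ fuel ih =>
    intro l cur acc h
    match l with
    | [] =>
      rw [PySem.Chars.splitOn.go.eq_def]
      simp [sOnAux, mapHd]
    | c :: t =>
      rw [PySem.Chars.splitOn.go.eq_def]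
      simp only []
      by_cases hp : (c0 :: sep').isPrefixOf (c :: t) = true
      · rw [if_pos hp]
        rw [ih _ _ _ (by simp at h ⊢; omega)]
        rw [sOnAux, if_pos hp, mapHd_congr _ _ (by simp)]
        simp [mapHd]
      · rw [if_neg hp]
        rw [ih _ _ _ (by simp at h ⊢; omega)]
        rw [sOnAux, if_neg hp, mapHd_mapHd]
        simp [mapHd]

lemma splitOn_eq (c0 : Char) (sep' : List Char) (s : List Char) :
    PySem.Chars.splitOn s (c0 :: sep') = sOnAux c0 sep' s := by
  rw [PySem.Chars.splitOn, splitOn_go_eq c0 sep' _ _ _ _ (by omega)]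
  rw [mapHd_congr _ _ (fun u => by simp)]
  simp

def repAux (c0 : Char) (sep' new : List Char) : List Char → List Char
  | [] => []
  | c :: t =>
    if (c0 :: sep').isPrefixOf (c :: t) then new ++ repAux c0 sep' new (t.drop sep'.length)
    else c :: repAux c0 sep' new t
termination_by l => l.length
decreasing_by all_goals (simp; try omega)

lemma replace_go_eq (c0 : Char) (sep' new : List Char) :
    ∀ (fuel : Nat) (l acc : List Char), l.length ≤ fuel →
      PySem.Chars.replace.go (c0 :: sep') new fuel l acc = acc.reverse ++ repAux c0 sep' new l := by
  intro fuel
  induction fuel with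
  | zero =>
    intro l acc h
    have hl : l = [] := by cases l <;> simp_all
    subst hl
    rw [PySem.Chars.replace.go.eq_def]
    simp [repAux]
  | succ fuel ih =>
    intro l acc h
    match l with
    | [] =>
      rw [PySem.Chars.replace.go.eq_def]
      simp [repAux]
    | c :: t =>
      rw [PySem.Chars.replace.go.eq_def]
      simp only []
      by_cases hp : (c0 :: sep').isPrefixOf (c :: t) = true
      · rw [if_pos hp, ih _ _ (by simp at h ⊢; omega)]
        rw [repAux, if_pos hp]
        simp
      · rw [if_neg hp, ih _ _ (by simp at h ⊢; omega)]
        rw [repAux, if_neg hp]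
        simp

lemma replace_eq (c0 : Char) (sep' new s : List Char) :
    PySem.Chars.replace s (c0 :: sep') new = repAux c0 sep' new s := by
  rw [PySem.Chars.replace]
  simp [replace_go_eq c0 sep' new _ _ _ (le_refl _)]

lemma sOnAux_ne_nil (c0 : Char) (sep' : List Char) : ∀ l, sOnAux c0 sep' l ≠ [] := by
  intro l
  induction l using sOnAux.induct c0 sep' with
  | case1 => simp [sOnAux]
  | case2 c t hp ih => rw [sOnAux, if_pos hp]; simp
  | case3 c t hp ih =>
    rw [sOnAux, if_neg hp]
    cases h : sOnAux c0 sep' t <;> simp_all [mapHd]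

lemma sC_cons_comma (x : List Char) : sOnAux ',' [] (',' :: x) = [] :: sOnAux ',' [] x := by
  rw [sOnAux, if_pos (by simp)]
  simp

lemma sC_cons_other (c : Char) (x : List Char) (hc : c ≠ ',') :
    sOnAux ',' [] (c :: x) = mapHd (c :: ·) (sOnAux ',' [] x) := by
  rw [sOnAux, if_neg (by simp [List.isPrefixOf]; exact fun h => hc h.symm)]

lemma mapHd_flatMap_sC (c : Char) (ts : List (List Char)) (hts : ts ≠ []) (hc : c ≠ ',') :
    (mapHd (c :: ·) ts).flatMap (sOnAux ',' []) = mapHd (c :: ·) (ts.flatMap (sOnAux ',' [])) := by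
  cases ts with
  | nil => simp at hts
  | cons p ps =>
    simp only [mapHd, List.flatMap_cons]
    rw [sC_cons_other c p hc]
    cases h : sOnAux ',' [] p with
    | nil => exact absurd h (sOnAux_ne_nil ',' [] p)
    | cons u us => simp [mapHd]

lemma comma_flat : ∀ l : List Char,
    sOnAux ',' [] (repAux ' ' ['&', ' '] [','] l)
      = (sOnAux ' ' ['&', ' '] l).flatMap (sOnAux ',' []) := by
  intro l
  induction l using repAux.induct ' ' ['&', ' '] with
  | case1 => simp [repAux, sOnAux]
  | case2 c t hp ih =>
    rw [repAux, if_pos hp]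
    conv_rhs => rw [sOnAux, if_pos hp]
    simp only [List.cons_append, List.nil_append, List.flatMap_cons]
    rw [sC_cons_comma, ih]
    have h0 : sOnAux ',' [] [] = [[]] := by rw [sOnAux]
    rw [h0]
    simp
  | case3 c t hp ih =>
    rw [repAux, if_neg hp]
    conv_rhs => rw [sOnAux, if_neg hp]
    by_cases hc : c = ','
    · subst hc
      rw [sC_cons_comma, ih]
      cases h : sOnAux ' ' ['&', ' '] t with
      | nil => exact absurd h (sOnAux_ne_nil _ _ _)
      | cons p ps =>
        simp only [mapHd, List.flatMap_cons, sC_cons_comma]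
        simp
    · rw [sC_cons_other c _ hc, ih, mapHd_flatMap_sC c _ (sOnAux_ne_nil _ _ _) hc]

def mapLa (f : List Char → List Char) : List (List Char) → List (List Char)
  | [] => []
  | [u] => [f u]
  | u :: u2 :: us => u :: mapLa f (u2 :: us)

lemma sC_noComma : ∀ l : List Char, ',' ∉ l → sOnAux ',' [] l = [l] := by
  intro l
  induction l with
  | nil => intro _; rw [sOnAux]
  | cons c t ih =>
    intro h
    simp at h
    rw [sC_cons_other c t (fun hc => h.1 hc.symm), ih h.2, mapHd]

lemma sC_space_left : ∀ w x : List Char, (∀ c ∈ w, PySem.Chars.isspace c = true) →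
    sOnAux ',' [] (w ++ x) = mapHd (fun u => w ++ u) (sOnAux ',' [] x) := by
  intro w
  induction w with
  | nil =>
    intro x _
    rw [mapHd_congr _ _ (fun u => by simp)]
    simp
  | cons c w' ih =>
    intro x hw
    have hc : c ≠ ',' := by
      intro h; subst h
      have := hw ',' (by simp)
      simp [PySem.Chars.isspace] at this
    rw [List.cons_append, sC_cons_other c _ hc, ih x (fun d hd => hw d (by simp [hd])), mapHd_mapHd]
    rfl

lemma mapHd_mapLa (c : Char) (w : List Char) (ts : List (List Char)) :
    mapHd (fun u => c :: u) (mapLa (fun u => u ++ w) ts)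
      = mapLa (fun u => u ++ w) (mapHd (fun u => c :: u) ts) := by
  match ts with
  | [] => rfl
  | [u] => rfl
  | u :: u2 :: us => rfl

lemma mapLa_cons_cons (f : List Char → List Char) (u u2 : List Char) (us : List (List Char)) :
    mapLa f (u :: u2 :: us) = u :: mapLa f (u2 :: us) := rfl

lemma sC_space_right : ∀ x w : List Char, (∀ c ∈ w, PySem.Chars.isspace c = true) →
    sOnAux ',' [] (x ++ w) = mapLa (fun u => u ++ w) (sOnAux ',' [] x) := by
  intro x
  induction x with
  | nil =>
    intro w hw
    have : ',' ∉ w := by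
      intro h
      have := hw ',' h
      simp [PySem.Chars.isspace] at this
    rw [List.nil_append, sC_noComma w this, sOnAux]
    rfl
  | cons c t ih =>
    intro w hw
    by_cases hc : c = ','
    · subst hc
      rw [List.cons_append, sC_cons_comma, sC_cons_comma, ih w hw]
      cases h : sOnAux ',' [] t with
      | nil => exact absurd h (sOnAux_ne_nil _ _ _)
      | cons u us => rfl
    · rw [List.cons_append, sC_cons_other c _ hc, sC_cons_other c _ hc, ih w hw, mapHd_mapLa]

lemma lstrip_space_left : ∀ w u : List Char, (∀ c ∈ w, PySem.Chars.isspace c = true) →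
    PySem.Chars.lstrip (w ++ u) = PySem.Chars.lstrip u := by
  intro w
  induction w with
  | nil => intro u _; rfl
  | cons c w' ih =>
    intro u hw
    simp only [PySem.Chars.lstrip, List.cons_append, List.dropWhile_cons,
      hw c (by simp), if_true]
    exact ih u (fun d hd => hw d (by simp [hd]))

lemma rstrip_space_right (u w : List Char) (hw : ∀ c ∈ w, PySem.Chars.isspace c = true) :
    PySem.Chars.rstrip (u ++ w) = PySem.Chars.rstrip u := by
  simp only [PySem.Chars.rstrip, List.reverse_append]
  rw [show List.dropWhile PySem.Chars.isspace (w.reverse ++ u.reverse)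
        = PySem.Chars.lstrip (w.reverse ++ u.reverse) from rfl,
      lstrip_space_left w.reverse u.reverse (fun c hc => hw c (by simpa using hc))]
  rfl

lemma strip_space_left (w u : List Char) (hw : ∀ c ∈ w, PySem.Chars.isspace c = true) :
    PySem.Chars.strip (w ++ u) = PySem.Chars.strip u := by
  rw [PySem.Chars.strip, PySem.Chars.strip, lstrip_space_left w u hw]

lemma strip_space_right (u w : List Char) (hw : ∀ c ∈ w, PySem.Chars.isspace c = true) :
    PySem.Chars.strip (u ++ w) = PySem.Chars.strip u := by
  rw [PySem.Chars.strip, PySem.Chars.strip]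
  by_cases h : PySem.Chars.lstrip u = []
  · have hw' : ∀ c ∈ u, PySem.Chars.isspace c = true := by
      simpa [PySem.Chars.lstrip, List.dropWhile_eq_nil_iff] using h
    rw [lstrip_space_left u w hw', h]
    have : PySem.Chars.lstrip w = [] := by
      simp only [PySem.Chars.lstrip, List.dropWhile_eq_nil_iff]
      exact fun c hc => hw c hc
    rw [this]
  · have : PySem.Chars.lstrip (u ++ w) = PySem.Chars.lstrip u ++ w := by
      simp only [PySem.Chars.lstrip] at h ⊢
      rw [List.dropWhile_append, if_neg (by simpa [List.isEmpty_iff] using h)]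
    rw [this, rstrip_space_right _ _ hw]

lemma strip_decomp (p : List Char) :
    ∃ w1 w2, (∀ c ∈ w1, PySem.Chars.isspace c = true) ∧ (∀ c ∈ w2, PySem.Chars.isspace c = true) ∧
      p = w1 ++ PySem.Chars.strip p ++ w2 := by
  refine ⟨p.takeWhile PySem.Chars.isspace,
    (((PySem.Chars.lstrip p).reverse.takeWhile PySem.Chars.isspace)).reverse, ?_, ?_, ?_⟩
  · intro c hc; exact List.mem_takeWhile_imp hc
  · intro c hc
    rw [List.mem_reverse] at hc
    exact List.mem_takeWhile_imp hc
  · rw [PySem.Chars.strip, PySem.Chars.rstrip]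
    conv_lhs => rw [← List.takeWhile_append_dropWhile (p := PySem.Chars.isspace) (l := p)]
    rw [List.append_assoc]
    congr 1
    rw [show List.dropWhile PySem.Chars.isspace p = PySem.Chars.lstrip p from rfl]
    conv_lhs => rw [← List.reverse_reverse (PySem.Chars.lstrip p),
      ← List.takeWhile_append_dropWhile (p := PySem.Chars.isspace) (l := (PySem.Chars.lstrip p).reverse)]
    rw [List.reverse_append]

lemma mem_strip (c : Char) (p : List Char) (hc : PySem.Chars.isspace c = false) :
    c ∈ PySem.Chars.strip p ↔ c ∈ p := by
  obtain ⟨w1, w2, h1, h2, hp⟩ := strip_decomp p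
  constructor
  · intro h
    rw [hp]; simp [h]
  · intro h
    rw [hp] at h
    simp at h
    rcases h with h | h | h
    · exact absurd (h1 c h) (by simp [hc])
    · exact h
    · exact absurd (h2 c h) (by simp [hc])

lemma map_strip_mapHd (w : List Char) (ts : List (List Char))
    (hw : ∀ c ∈ w, PySem.Chars.isspace c = true) :
    (mapHd (fun u => w ++ u) ts).map PySem.Chars.strip = ts.map PySem.Chars.strip := by
  cases ts with
  | nil => rfl
  | cons u us => simp [mapHd, strip_space_left w u hw]

lemma map_strip_mapLa (w : List Char) : ∀ (ts : List (List Char)),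
    (∀ c ∈ w, PySem.Chars.isspace c = true) →
    (mapLa (fun u => u ++ w) ts).map PySem.Chars.strip = ts.map PySem.Chars.strip := by
  intro ts
  induction ts with
  | nil => intro _; rfl
  | cons u us ih =>
    intro hw
    cases us with
    | nil => simp [mapLa, strip_space_right u w hw]
    | cons u2 us' => simp [mapLa_cons_cons, ih hw]

lemma map_strip_sC_strip (p : List Char) :
    (sOnAux ',' [] (PySem.Chars.strip p)).map PySem.Chars.strip
      = (sOnAux ',' [] p).map PySem.Chars.strip := by
  obtain ⟨w1, w2, h1, h2, hp⟩ := strip_decomp p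
  conv_rhs => rw [hp]
  rw [List.append_assoc, sC_space_left w1 _ h1, map_strip_mapHd w1 _ h1,
    sC_space_right _ w2 h2, map_strip_mapLa w2 _ h2]

def pnames (p : List Char) : List (List Char) :=
  ((sOnAux ',' [] p).map PySem.Chars.strip).filter (fun n => !n.isEmpty)

lemma inner_foldl_eq : ∀ (l : List (List Char)) (s : PySem.Set (List Char)),
    l.foldl (fun ns n0 => let n := PySem.Chars.strip n0; if n = [] then ns else PySem.Set.add ns n) s
      = PySem.Set.update s ((l.map PySem.Chars.strip).filter (fun n => !n.isEmpty)) := by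
  intro l
  induction l with
  | nil => intro s; rfl
  | cons n0 rest ih =>
    intro s
    simp only [List.foldl_cons, List.map_cons, List.filter_cons]
    by_cases h : PySem.Chars.strip n0 = []
    · simp [h, ih, PySem.Set.update]
    · have : (!(PySem.Chars.strip n0).isEmpty) = true := by simp [h]
      simp only [h, this, if_true, ih]
      simp [PySem.Set.update]

lemma partStep_eq (s : PySem.Set (List Char)) (p : List Char) :
    pvPartStep s p = PySem.Set.update s (pnames p) := by
  rw [pvPartStep, pnames]
  by_cases h0 : PySem.Chars.strip p = []
  · have hnc : (','  : Char) ∉ p := by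
      intro hm
      rw [← mem_strip ',' p (by decide)] at hm
      simp [h0] at hm
    rw [sC_noComma p hnc]
    simp [h0, PySem.Set.update]
  · simp only [h0]
    by_cases hin : PySem.Chars.isIn [','] (PySem.Chars.strip p) = true
    · rw [if_pos hin, splitOn_eq ',' [], inner_foldl_eq, map_strip_sC_strip]
      simp
    · rw [if_neg hin]
      have hnc : (',' : Char) ∉ p := by
        rw [← mem_strip ',' p (by decide)]
        intro hm
        exact hin (by rw [PySem.Chars.isIn_iff_infix, List.singleton_infix_iff]; exact hm)
      rw [sC_noComma p hnc]
      have : (!(PySem.Chars.strip p).isEmpty) = true := by simp [h0]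
      simp [this, PySem.Set.update]

lemma outer_foldl_eq : ∀ (parts : List (List Char)) (s : PySem.Set (List Char)),
    parts.foldl pvPartStep s = PySem.Set.update s (parts.flatMap pnames) := by
  intro parts
  induction parts with
  | nil => intro s; rfl
  | cons p ps ih =>
    intro s
    rw [List.foldl_cons, partStep_eq, ih, List.flatMap_cons, PySem.Set.update,
      PySem.Set.update, PySem.Set.update, List.foldl_append]

-- ===== VERDICT (by name: the statement is the Claim_ definition above) =====
theorem extract_names_from_value_spec : Claim_equal_extract_names_from_value := by
  intro v _
  unfold Spec_extract_names_from_value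
  cases v with
  | none => rfl
  | some str =>
    simp only [extract_names_from_value, extract_names_from_value_alt]
    by_cases hs : PySem.Chars.strip str.toList = []
    · rw [if_pos hs, if_pos hs]
    · rw [if_neg hs, if_neg hs]
      congr 1
      rw [splitOn_eq ' ' ['&', ' '], outer_foldl_eq, replace_eq, splitOn_eq ',' [], comma_flat,
        List.map_flatMap, List.filter_flatMap]
      have hfm : (sOnAux ' ' ['&', ' '] (PySem.Chars.strip str.toList)).flatMap pnames
          = (sOnAux ' ' ['&', ' '] (PySem.Chars.strip str.toList)).flatMap
              (fun a => ((sOnAux ',' [] a).map PySem.Chars.strip).filter (fun n => !n.isEmpty)) := rfl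
      rw [hfm]
      rw [show (PySem.Set.empty : PySem.Set (List Char)) = [] from rfl, PySem.Set.update_nil_left]
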